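-- pv_equiv track=rewrite | github.com/anton-kutuzov/LeetCode | scripts/add_problem.py | pick_topic
-- ===== SOURCE A (Python) =====
-- TAG_TO_TOPIC: list[tuple[str, str]] = [
--     ("Linked List", "linkedlist"),
--     ("Binary Search Tree", "tree"),
--     ("Binary Tree", "tree"),
--     ("Tree", "tree"),
--     ("Stack", "stack"),
--     ("Monotonic Stack", "stack"),
--     ("Queue", "stack"),
--     ("Monotonic Queue", "stack"),
--     ("Backtracking", "backtracking"),
--     ("Hash Table", "hashtable"),
--     ("Two Pointers", "two_points"),
--     ("Sliding Window", "two_points"),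
--     ("Binary Search", "binary_search"),
--     ("Dynamic Programming", "dynamic_programming"),
--     ("Greedy", "greedy"),
--     ("String", "string"),
--     ("Array", "array"),
--     ("Math", "math"),
-- ]
--
-- def pick_topic(tags: list[dict], override: str | None) -> str:
--     if override:
--         return override
--     tag_names = {t["name"] for t in tags}
--     for tag, topic in TAG_TO_TOPIC:
--         if tag in tag_names:
--             return topic
--     return "math"  # fallback bucket
-- ===== SOURCE B (Python) =====
-- _RANK = {
--     "Linked List": 0, "Binary Search Tree": 1, "Binary Tree": 2, "Tree": 3,
--     "Stack": 4, "Monotonic Stack": 5, "Queue": 6, "Monotonic Queue": 7,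
--     "Backtracking": 8, "Hash Table": 9, "Two Pointers": 10, "Sliding Window": 11,
--     "Binary Search": 12, "Dynamic Programming": 13, "Greedy": 14, "String": 15,
--     "Array": 16, "Math": 17,
-- }
--
-- _TOPICS = ["linkedlist", "tree", "tree", "tree", "stack", "stack", "stack", "stack",
--            "backtracking", "hashtable", "two_points", "two_points", "binary_search",
--            "dynamic_programming", "greedy", "string", "array", "math"]
--
-- def pick_topic(tags: list, override) -> str:
--     if override:
--         return override
--     ranks = [_RANK[t["name"]] for t in tags if t["name"] in _RANK]
--     return _TOPICS[min(ranks)] if ranks else "math"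
-- ===== Notes on version B (the rewrite author's own statement) =====
-- stated objective: alternative
-- what changed: B replaces A's build-a-name-set-then-scan-the-priority-table strategy by two precomputed structures (a tag->rank dict and a rank->topic array): it collects the ranks of the matched input tags in one comprehension and returns the topic at the minimum rank.
import Mathlib
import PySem

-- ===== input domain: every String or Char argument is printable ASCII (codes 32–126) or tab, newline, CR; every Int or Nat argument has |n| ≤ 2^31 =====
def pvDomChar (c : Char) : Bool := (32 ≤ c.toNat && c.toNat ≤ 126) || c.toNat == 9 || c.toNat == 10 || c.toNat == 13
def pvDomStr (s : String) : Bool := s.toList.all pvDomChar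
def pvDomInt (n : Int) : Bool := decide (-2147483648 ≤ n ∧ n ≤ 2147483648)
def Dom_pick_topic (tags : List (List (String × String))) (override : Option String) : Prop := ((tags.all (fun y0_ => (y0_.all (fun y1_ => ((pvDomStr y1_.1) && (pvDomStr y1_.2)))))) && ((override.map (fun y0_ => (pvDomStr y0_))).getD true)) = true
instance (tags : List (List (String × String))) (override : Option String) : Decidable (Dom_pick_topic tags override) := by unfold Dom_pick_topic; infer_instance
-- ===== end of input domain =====

-- B: instead of building the set of tag names and scanning the priority table for its first
-- member, B keeps a tag->rank dict and a rank->topic array, collects the ranks of the matched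
-- input tags, and indexes the array at the minimum rank (alternative decomposition, same cost).

-- shared tiny helpers (both Pythons test `if override:` and read t["name"])
-- Python truthiness of `override` (None and "" are falsy)
def pvTruthy : Option String → Bool
  | none => false
  | some s => !(s == "")

-- t["name"]; total via a default — Pre_ guarantees the key is present
def pvName (t : List (String × String)) : String := (PySem.Dict.mk t).getD "name" ""

-- ===== PORT A =====
-- the module constant TAG_TO_TOPIC
def tagToTopic : List (String × String) := [
  ("Linked List", "linkedlist"), ("Binary Search Tree", "tree"), ("Binary Tree", "tree"),
  ("Tree", "tree"), ("Stack", "stack"), ("Monotonic Stack", "stack"), ("Queue", "stack"),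
  ("Monotonic Queue", "stack"), ("Backtracking", "backtracking"), ("Hash Table", "hashtable"),
  ("Two Pointers", "two_points"), ("Sliding Window", "two_points"), ("Binary Search", "binary_search"),
  ("Dynamic Programming", "dynamic_programming"), ("Greedy", "greedy"), ("String", "string"),
  ("Array", "array"), ("Math", "math")]

-- the `for tag, topic in TAG_TO_TOPIC` loop
def pickLoopA (names : PySem.Set String) : List (String × String) → String
  | [] => "math"
  | (tag, topic) :: rest => if PySem.Set.contains names tag then topic else pickLoopA names rest

def pick_topic (tags : List (List (String × String))) (override : Option String) : String :=
  if pvTruthy override then override.getD ""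
  else pickLoopA (PySem.Set.ofList (tags.map pvName)) tagToTopic

-- ===== PORT B =====
-- B's module constant _RANK (a dict literal, written out as Source B writes it)
def pvRankB : PySem.Dict String Int := PySem.Dict.mk [
  ("Linked List", 0), ("Binary Search Tree", 1), ("Binary Tree", 2), ("Tree", 3),
  ("Stack", 4), ("Monotonic Stack", 5), ("Queue", 6), ("Monotonic Queue", 7),
  ("Backtracking", 8), ("Hash Table", 9), ("Two Pointers", 10), ("Sliding Window", 11),
  ("Binary Search", 12), ("Dynamic Programming", 13), ("Greedy", 14), ("String", 15),
  ("Array", 16), ("Math", 17)]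

-- B's module constant _TOPICS
def pvTopicsB : List String := ["linkedlist", "tree", "tree", "tree", "stack", "stack",
  "stack", "stack", "backtracking", "hashtable", "two_points", "two_points", "binary_search",
  "dynamic_programming", "greedy", "string", "array", "math"]

def pick_topic_alt (tags : List (List (String × String))) (override : Option String) : String :=
  if pvTruthy override then override.getD ""
  else
    -- ranks = [_RANK[t["name"]] for t in tags if t["name"] in _RANK]
    -- (get? is none exactly when the membership test fails, so filterMap is the comprehension)
    let ranks : List Int := tags.filterMap (fun t => PySem.Dict.get? pvRankB (pvName t))
    -- _TOPICS[min(ranks)] if ranks else "math"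
    match PySem.List.min? ranks (fun x => x) with
    | none => "math"
    | some m => (PySem.List.pyGet? pvTopicsB m).getD ""  -- every rank is 0..17, IndexError unreachable

-- ===== PRECONDITION & SPEC =====
-- Pre_ excludes exactly the inputs where the Python A raises KeyError: some tag dict
-- lacks the "name" key while override is falsy (B raises there too).
def Pre_pick_topic (tags : List (List (String × String))) (override : Option String) : Prop :=
  pvTruthy override = true ∨ ∀ t ∈ tags, (PySem.Dict.mk t).contains "name" = true

instance (tags : List (List (String × String))) (override : Option String) : Decidable (Pre_pick_topic tags override) := by
  unfold Pre_pick_topic; infer_instance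

def pvWitness_pick_topic : (List (List (String × String))) × Option String :=
  ([[("name", "Tree")], [("name", "Array")]], none)

def Spec_pick_topic (tags : List (List (String × String))) (override : Option String) (out : String) : Prop := out = pick_topic_alt tags override
instance (tags : List (List (String × String))) (override : Option String) (out : String) : Decidable (Spec_pick_topic tags override out) := by unfold Spec_pick_topic; infer_instance

-- ===== CLAIM (what is proved, stated in full; the proofs are below) =====
def Claim_equal_pick_topic : Prop := ∀ (tags : List (List (String × String))) (override : Option String), Dom_pick_topic tags override → Pre_pick_topic tags override → Spec_pick_topic tags override (pick_topic tags override)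

-- ===== LEMMAS AND PROOFS =====

-- first table entry (with its index) whose tag occurs in ns — the common reference value
def pvFirstIdx (ns : List String) : List (String × String) → Int → Option (Int × String)
  | [], _ => none
  | (tag, topic) :: rest, k => if ns.contains tag then some (k, topic) else pvFirstIdx ns rest (k + 1)

def pvMerge : Option (Int × String) → Option (Int × String) → Option (Int × String)
  | none, b => b
  | some a, none => some a
  | some a, some b => if b.1 < a.1 then some b else some a

theorem pvFirstIdx_nil (table : List (String × String)) (k : Int) :
    pvFirstIdx [] table k = none := by
  induction table generalizing k with
  | nil => rfl
  | cons h rest ih => cases h; simp [pvFirstIdx, ih]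

theorem pvFirstIdx_le (ns : List String) (table : List (String × String)) (k : Int)
    (b : Int × String) (h : pvFirstIdx ns table k = some b) : k ≤ b.1 := by
  induction table generalizing k with
  | nil => simp [pvFirstIdx] at h
  | cons hd rest ih =>
    cases hd with
    | mk tag topic =>
      by_cases hc : tag ∈ ns
      · cases b
        simp [pvFirstIdx, hc] at h
        omega
      · simp [pvFirstIdx, hc] at h
        have := ih (k + 1) h; omega

theorem pickLoopA_eq_firstIdx (ns : List String) (table : List (String × String)) (k : Int) :
    pickLoopA (PySem.Set.ofList ns) table =
      (match pvFirstIdx ns table k with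
       | some b => b.2
       | none => "math") := by
  induction table generalizing k with
  | nil => rfl
  | cons hd rest ih =>
    cases hd with
    | mk tag topic =>
      by_cases hc : tag ∈ ns
      · simp [pickLoopA, pvFirstIdx, hc]
      · simp [pickLoopA, pvFirstIdx, hc, ih (k + 1)]

-- the dict index answers exactly the rank of the single-name table scan
theorem rankB_eq_firstIdx (n : String) :
    PySem.Dict.get? pvRankB n = (pvFirstIdx [n] tagToTopic 0).map Prod.fst := by
  have hempty : (PySem.Dict.mk ([] : List (String × Int))).get? n = none := rfl
  simp only [pvRankB, PySem.Dict.get?_mk_cons, tagToTopic, pvFirstIdx, List.contains_cons,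
    List.contains_nil, Bool.or_false, hempty]
  simp only [apply_ite (Option.map (Prod.fst : Int × String → Int)), Option.map_some,
    Option.map_none]
  norm_num

-- the matched table entry's topic sits at its rank in the snd-projection of the table
theorem firstIdx_get (ns : List String) (table : List (String × String)) (k j : Int) (t : String)
    (h : pvFirstIdx ns table k = some (j, t)) :
    PySem.List.pyGet? (table.map Prod.snd) (j - k) = some t := by
  induction table generalizing k with
  | nil => simp [pvFirstIdx] at h
  | cons hd rest ih =>
    cases hd with
    | mk tag topic =>
      by_cases hc : tag ∈ ns
      · simp [pvFirstIdx, hc] at h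
        obtain ⟨hj, ht⟩ := h
        subst ht
        simp [← hj]
      · simp [pvFirstIdx, hc] at h
        have hle := pvFirstIdx_le ns rest (k + 1) (j, t) h
        have hrec := ih (k + 1) h
        have h0 : (0 : Int) ≤ j - (k + 1) := by omega
        rw [PySem.List.pyGet?_of_nonneg _ h0] at hrec
        have h0' : (0 : Int) ≤ j - k := by omega
        rw [PySem.List.pyGet?_of_nonneg _ h0']
        have htn : (j - k).toNat = (j - (k + 1)).toNat + 1 := by omega
        simp [htn, hrec]

theorem firstIdx_append (ns : List String) (n : String) (table : List (String × String)) (k : Int) :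
    pvFirstIdx (ns ++ [n]) table k = pvMerge (pvFirstIdx ns table k) (pvFirstIdx [n] table k) := by
  induction table generalizing k with
  | nil => rfl
  | cons hd rest ih =>
    cases hd with
    | mk tag topic =>
      by_cases h2 : tag = n
      · subst h2
        by_cases h1 : tag ∈ ns
        · simp [pvFirstIdx, h1, pvMerge]
        · simp only [pvFirstIdx, List.contains_eq_mem, List.mem_append, List.mem_singleton,
            h1, or_true, decide_true, decide_false, if_true, Bool.false_eq_true, if_false]
          cases hrec : pvFirstIdx ns rest (k + 1) with
          | none => simp [pvMerge]
          | some b =>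
            have hb := pvFirstIdx_le ns rest (k + 1) b hrec
            have hk : k < b.1 := by omega
            simp [pvMerge, hk]
      · by_cases h1 : tag ∈ ns
        · simp only [pvFirstIdx, List.contains_eq_mem, List.mem_append, List.mem_singleton,
            h1, h2, or_false, decide_true, decide_false, if_true, Bool.false_eq_true, if_false]
          cases hrec : pvFirstIdx [n] rest (k + 1) with
          | none => simp [pvMerge]
          | some b =>
            have hb := pvFirstIdx_le [n] rest (k + 1) b hrec
            have hk : ¬ b.1 < k := by omega
            simp [pvMerge, hk]
        · simp [pvFirstIdx, h1, h2, ih (k + 1)]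

-- min of a list extended by one element, in running-min form
theorem min?_append_singleton (xs : List Int) (x : Int) :
    PySem.List.min? (xs ++ [x]) (fun y => y) =
      some (match PySem.List.min? xs (fun y => y) with
            | none => x
            | some m => min m x) := by
  cases xs with
  | nil => simp [PySem.List.min?]
  | cons h t =>
    rw [List.cons_append, PySem.List.min?_id_cons, PySem.List.min?_id_cons,
      List.foldl_append]
    simp

-- B's collected minimum rank is the rank of A's first matching table entry
theorem minRank_eq_firstIdx (ns : List String) :
    PySem.List.min? (ns.filterMap (fun n => PySem.Dict.get? pvRankB n)) (fun x => x) =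
      (pvFirstIdx ns tagToTopic 0).map Prod.fst := by
  induction ns using List.reverseRecOn with
  | nil => simp [PySem.List.min?, pvFirstIdx_nil]
  | append_singleton ms n ih =>
    have hsing : List.filterMap (fun n => PySem.Dict.get? pvRankB n) [n] =
        ((pvFirstIdx [n] tagToTopic 0).map Prod.fst).toList := by
      rw [← rankB_eq_firstIdx n]
      simp only [List.filterMap_cons, List.filterMap_nil]
      cases PySem.Dict.get? pvRankB n <;> rfl
    rw [List.filterMap_append, firstIdx_append, hsing]
    cases hg : pvFirstIdx [n] tagToTopic 0 with
    | none =>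
      simp only [Option.map_none, Option.toList_none, List.append_nil, ih]
      cases pvFirstIdx ms tagToTopic 0 <;> simp [pvMerge]
    | some b =>
      simp only [Option.map_some, Option.toList_some]
      rw [min?_append_singleton, ih]
      cases ha : pvFirstIdx ms tagToTopic 0 with
      | none => simp [pvMerge]
      | some a =>
        simp only [Option.map_some, pvMerge]
        by_cases hlt : b.1 < a.1
        · simp [hlt, min_eq_right (le_of_lt hlt)]
        · simp [hlt, min_eq_left (by omega : a.1 ≤ b.1)]

-- ===== VERDICT (by name: the statement is the Claim_ definition above) =====
theorem pick_topic_spec : Claim_equal_pick_topic := by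
  intro tags override _ _
  unfold Spec_pick_topic pick_topic pick_topic_alt
  by_cases h : pvTruthy override = true
  · simp [h]
  · rw [Bool.not_eq_true] at h
    simp only [h, Bool.false_eq_true, if_false]
    rw [pickLoopA_eq_firstIdx (tags.map pvName) tagToTopic 0]
    have hmap : tags.filterMap (fun t => PySem.Dict.get? pvRankB (pvName t)) =
        (tags.map pvName).filterMap (fun n => PySem.Dict.get? pvRankB n) := by
      rw [List.filterMap_map]; rfl
    rw [hmap, minRank_eq_firstIdx]
    cases hf : pvFirstIdx (tags.map pvName) tagToTopic 0 with
    | none => simp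
    | some b =>
      cases b with
      | mk j t =>
        have hget := firstIdx_get (tags.map pvName) tagToTopic 0 j t hf
        simp only [Option.map_some]
        have htbl : tagToTopic.map Prod.snd = pvTopicsB := by decide
        rw [htbl] at hget
        simp only [sub_zero] at hget
        simp [hget]
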